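-- pv_equiv track=rewrite | github.com/kiharalab/DiffModeler | VESPER_CUDA/obselete/legacy.py | next_fast_fft_len
-- ===== SOURCE A (Python) =====
-- def next_fast_fft_len(size):
--     a = 2
--     while 1:
--         if a > size:
--             break
--         a *= 2
--
--     b = 3
--     while 1:
--         if b > size:
--             break
--         b *= 2
--
--     b = 9
--     while 1:
--         if b > size:
--             break
--         b *= 2
--     if a > b:
--         return b
--     else:
--         return a
-- ===== SOURCE B (Python) =====
-- def next_fast_fft_len(size):
--     if size <= 0:
--         return 2
--     a = 1 << size.bit_length()        # smallest power of two strictly > size (size >= 1)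
--     b = 9 << (size // 9).bit_length() # smallest 9*2^k strictly > size
--     return min(a, b)
-- ===== Notes on version B (the rewrite author's own statement) =====
-- stated objective: simpler
-- what changed: Replaces the three doubling while-loops (one of them dead) by a closed-form computation via bit_length: the least power of two exceeding size, and the least nine-times-a-power-of-two exceeding size, returning the smaller of the two.
import Mathlib
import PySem

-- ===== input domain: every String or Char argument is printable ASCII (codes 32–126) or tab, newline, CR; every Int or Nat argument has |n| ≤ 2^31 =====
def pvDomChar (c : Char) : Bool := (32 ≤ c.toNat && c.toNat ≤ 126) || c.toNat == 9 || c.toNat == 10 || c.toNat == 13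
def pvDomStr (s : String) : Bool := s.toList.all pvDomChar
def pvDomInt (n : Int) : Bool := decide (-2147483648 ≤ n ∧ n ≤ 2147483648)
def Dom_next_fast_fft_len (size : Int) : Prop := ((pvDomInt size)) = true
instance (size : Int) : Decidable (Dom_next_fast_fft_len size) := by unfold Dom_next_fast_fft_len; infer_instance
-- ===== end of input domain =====

-- B replaces A's three doubling while-loops (one dead) by a closed-form bit_length computation (simpler).

-- ===== PORT A =====
-- 'while 1: if x > size: break; x *= 2' — the doubling loop, step for step.
-- The 'x ≤ 0' guard only makes the recursion total; A only calls it with x ∈ {2, 3, 9}.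
def pvDoubleLoop (size x : Int) : Int :=
  if _h : x ≤ 0 then x
  else if x > size then x
  else pvDoubleLoop size (x * 2)
termination_by (size + 1 - x).toNat
decreasing_by omega

def next_fast_fft_len (size : Int) : Int :=
  let a := pvDoubleLoop size 2
  let b := pvDoubleLoop size 3      -- dead: immediately overwritten, as in A
  let b := pvDoubleLoop size 9
  if a > b then b else a

-- ===== PORT B =====
def next_fast_fft_len_alt (size : Int) : Int :=
  if size ≤ 0 then 2
  else
    -- 1 << k = 2^k, 9 << k = 9 * 2^k
    let a : Int := 2 ^ PySem.Int.bitLength size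
    let b : Int := 9 * 2 ^ PySem.Int.bitLength (PySem.Int.floordiv size 9)
    min a b

-- ===== PRECONDITION & SPEC =====
def Spec_next_fast_fft_len (size : Int) (out : Int) : Prop := out = next_fast_fft_len_alt size
instance (size : Int) (out : Int) : Decidable (Spec_next_fast_fft_len size out) := by unfold Spec_next_fast_fft_len; infer_instance

-- ===== CLAIM (what is proved, stated in full; the proofs are below) =====
def Claim_equal_next_fast_fft_len : Prop := ∀ (size : Int), Dom_next_fast_fft_len size → Spec_next_fast_fft_len size (next_fast_fft_len size)

-- ===== LEMMAS AND PROOFS =====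

-- The doubling loop returns t whenever t is of the form x * 2^k, exceeds size, and is minimal such.
theorem pvDoubleLoop_eq (size x t : Int) (hx : 0 < x)
    (hk : ∃ k : Nat, t = x * 2 ^ k) (hgt : size < t)
    (hmin : ∀ k : Nat, size < x * 2 ^ k → t ≤ x * 2 ^ k) :
    pvDoubleLoop size x = t := by
  rw [pvDoubleLoop]
  split
  · omega
  · split
    · obtain ⟨k, rfl⟩ := hk
      have h0 := hmin 0 (by simpa using ‹x > size›)
      have h1 : (1 : Int) ≤ 2 ^ k := one_le_pow₀ (by norm_num)
      have h2 : x * 1 ≤ x * 2 ^ k := mul_le_mul_of_nonneg_left h1 hx.le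
      simp at h0
      omega
    · apply pvDoubleLoop_eq size (x * 2) t (by omega)
      · obtain ⟨k, rfl⟩ := hk
        cases k with
        | zero => simp at hgt; omega
        | succ k' => exact ⟨k', by ring⟩
      · exact hgt
      · intro k hkk
        have := hmin (k + 1) (by rw [pow_succ]; linarith [hkk])
        rw [pow_succ] at this; linarith
termination_by (size + 1 - x).toNat
decreasing_by omega

theorem pv_bitLength_le_of_lt {n : Int} {k : Nat} (hn : 0 ≤ n) (h : n < 2 ^ k) :
    PySem.Int.bitLength n ≤ k := by
  rcases eq_or_lt_of_le hn with h0 | h0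
  · simp [← h0]
  · by_contra hc
    push Not at hc
    have h1 : 2 ^ (PySem.Int.bitLength n - 1) ≤ n.natAbs :=
      PySem.Int.two_pow_bitLength_le n (by omega)
    have h2 : 2 ^ k ≤ 2 ^ (PySem.Int.bitLength n - 1) :=
      Nat.pow_le_pow_right (by norm_num) (by omega)
    have h3 : (n.natAbs : Int) = n := Int.natAbs_of_nonneg hn
    have h4 : ((2 : Int) ^ k) = ((2 ^ k : Nat) : Int) := by push_cast; ring
    omega

theorem pv_lt_two_pow_bl (n : Int) : n < 2 ^ PySem.Int.bitLength n := by
  have h1 : n.natAbs < 2 ^ PySem.Int.bitLength n := PySem.Int.lt_two_pow_bitLength n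
  have h4 : ((2 : Int) ^ PySem.Int.bitLength n) = ((2 ^ PySem.Int.bitLength n : Nat) : Int) := by
    push_cast; ring
  omega

theorem pv_bl_pos {n : Int} (hn : 0 < n) : 1 ≤ PySem.Int.bitLength n := by
  by_contra hc
  have h1 : n.natAbs < 2 ^ PySem.Int.bitLength n := PySem.Int.lt_two_pow_bitLength n
  have : PySem.Int.bitLength n = 0 := by omega
  rw [this] at h1
  omega

-- ===== VERDICT (by name: the statement is the Claim_ definition above) =====
theorem next_fast_fft_len_spec : Claim_equal_next_fast_fft_len := by
  intro size _
  unfold Spec_next_fast_fft_len next_fast_fft_len next_fast_fft_len_alt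
  by_cases hs : size ≤ 0
  · -- 2 > size and 9 > size: all three loops stop immediately
    have h2 : pvDoubleLoop size 2 = 2 := by
      rw [pvDoubleLoop]; rw [dif_neg (by norm_num), if_pos (by omega)]
    have h9 : pvDoubleLoop size 9 = 9 := by
      rw [pvDoubleLoop]; rw [dif_neg (by norm_num), if_pos (by omega)]
    simp only [hs, if_pos, h2, h9]
    norm_num
  · push Not at hs
    simp only [if_neg (by omega : ¬ size ≤ 0)]
    set blA := PySem.Int.bitLength size with hblA
    set q := PySem.Int.floordiv size 9 with hq
    set blB := PySem.Int.bitLength q with hblB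
    have hqb : q * 9 ≤ size ∧ size < (q + 1) * 9 :=
      (PySem.Int.floordiv_eq_iff_of_pos (by norm_num)).mp rfl
    have hq0 : 0 ≤ q := by nlinarith [hqb.1, hqb.2]
    have ha : pvDoubleLoop size 2 = 2 ^ blA := by
      apply pvDoubleLoop_eq size 2 _ (by norm_num)
      · refine ⟨blA - 1, ?_⟩
        have h1 : 1 ≤ blA := pv_bl_pos hs
        rw [← pow_succ']
        congr 1
        omega
      · exact pv_lt_two_pow_bl size
      · intro k hk
        have h2 : size < 2 ^ (k + 1) := by rw [pow_succ']; linarith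
        have h3 : blA ≤ k + 1 := pv_bitLength_le_of_lt (by omega) h2
        calc (2 : Int) ^ blA ≤ 2 ^ (k + 1) := by
              exact pow_le_pow_right₀ (by norm_num) h3
          _ = 2 * 2 ^ k := by rw [pow_succ']
    have hb : pvDoubleLoop size 9 = 9 * 2 ^ blB := by
      apply pvDoubleLoop_eq size 9 _ (by norm_num)
      · exact ⟨blB, rfl⟩
      · have h1 : q < 2 ^ blB := pv_lt_two_pow_bl q
        nlinarith [hqb.2]
      · intro k hk
        have h2 : q < 2 ^ k := by nlinarith [hqb.1]
        have h3 : blB ≤ k := pv_bitLength_le_of_lt hq0 h2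
        have h4 : (2 : Int) ^ blB ≤ 2 ^ k := pow_le_pow_right₀ (by norm_num) h3
        linarith
    rw [ha, hb]
    rw [Int.min_def]
    split_ifs <;> omega
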